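-- pv_equiv track=rewrite | github.com/homebysix/autopkg-dupe-tracker | build.py | compare_filenames
-- ===== SOURCE A (Python) =====
-- def append_result(results, result_hash, item):
--     """Append to results, creating an index if needed."""
--
--     if result_hash not in results:
--         results[result_hash] = [item]
--     else:
--         results[result_hash].append(item)
--
--     return results
--
-- def compare_filenames(recipes, ignore_numbers=False):
--     """Detect duplicate filenames, ignoring case and spaces."""
--
--     results = {}
--     for relpath, recipe in recipes.items():
--         filename = recipe["filename"].lower().replace(" ", "")
--         if filename.startswith("sharedprocessors"):
--             continue
--         if ignore_numbers:
--             filename = "".join(x for x in filename if not x.isdigit())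
--         results = append_result(results, filename, relpath)
--
--     return results
-- ===== SOURCE B (Python) =====
-- def compare_filenames(recipes, ignore_numbers=False):
--     """Detect duplicate filenames, ignoring case and spaces."""
--
--     def norm(recipe):
--         filename = recipe["filename"].lower().replace(" ", "")
--         if filename.startswith("sharedprocessors"):
--             return None
--         if ignore_numbers:
--             filename = "".join(x for x in filename if not x.isdigit())
--         return filename
--
--     pairs = [(f, relpath) for (f, relpath) in
--              ((norm(recipe), relpath) for relpath, recipe in recipes.items())
--              if f is not None]
--     keys = list(dict.fromkeys(f for f, _ in pairs))
--     return {k: [p for f, p in pairs if f == k] for k in keys}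
-- ===== Notes on version B (the rewrite author's own statement) =====
-- stated objective: alternative
-- what changed: Replaces A's incremental dict accumulation (append_result with a membership test per item) by a two-phase pass: first build the filtered list of (normalized filename, relpath) pairs, then take the first-appearance-ordered distinct filenames (dict.fromkeys) and build each group by a scan of the pairs list.
import Mathlib
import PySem

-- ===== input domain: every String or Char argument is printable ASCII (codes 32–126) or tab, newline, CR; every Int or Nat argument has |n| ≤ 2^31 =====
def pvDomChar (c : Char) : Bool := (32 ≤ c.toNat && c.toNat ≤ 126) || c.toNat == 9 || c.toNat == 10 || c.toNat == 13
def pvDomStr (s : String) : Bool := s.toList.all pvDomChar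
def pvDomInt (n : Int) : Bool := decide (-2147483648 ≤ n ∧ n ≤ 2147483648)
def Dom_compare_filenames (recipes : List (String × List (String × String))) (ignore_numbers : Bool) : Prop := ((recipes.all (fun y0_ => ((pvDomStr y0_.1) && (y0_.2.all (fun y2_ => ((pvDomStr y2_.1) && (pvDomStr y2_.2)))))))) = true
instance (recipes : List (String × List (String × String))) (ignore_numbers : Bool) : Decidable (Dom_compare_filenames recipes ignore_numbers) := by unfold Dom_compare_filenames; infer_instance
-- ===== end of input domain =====

-- B replaces A's incremental dict accumulation by a two-phase pass (build the filtered
-- (filename, relpath) pair list, then group by first-appearance-ordered distinct filenames);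
-- objective: alternative decomposition, same result in the same key order.

-- ===== PORT A =====
-- append_result: results[h] = [item] if h absent, else results[h].append(item)
def append_result (results : PySem.Dict String (List String)) (result_hash : String) (item : String) : PySem.Dict String (List String) :=
  if results.contains result_hash = false then results.insert result_hash [item]
  else results.modify result_hash [] (fun l => l ++ [item])   -- results[h].append(item): in-place list append

def compare_filenames (recipes : List (String × List (String × String))) (ignore_numbers : Bool) : List (String × List String) :=
  (recipes.foldl (fun results p =>
      -- recipe["filename"]: getD with a dummy default, used only under Pre_ (key present; KeyError otherwise)
      let filename := PySem.Str.replace (PySem.Str.lower ((PySem.Dict.ofList p.2).getD "filename" "")) " " ""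
      if PySem.Str.startswith filename "sharedprocessors" then results   -- continue
      else
        let filename := if ignore_numbers then String.mk (filename.toList.filter (fun x => !PySem.Chars.isdigit x)) else filename
        append_result results filename p.1)
    PySem.Dict.empty).items

-- ===== PORT B =====
-- norm(recipe): the normalized filename, or None for the sharedprocessors skip
def pvNorm (ignore_numbers : Bool) (recipe : List (String × String)) : Option String :=
  let filename := PySem.Str.replace (PySem.Str.lower ((PySem.Dict.ofList recipe).getD "filename" "")) " " ""
  if PySem.Str.startswith filename "sharedprocessors" then none
  else some (if ignore_numbers then String.mk (filename.toList.filter (fun x => !PySem.Chars.isdigit x)) else filename)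

def compare_filenames_alt (recipes : List (String × List (String × String))) (ignore_numbers : Bool) : List (String × List String) :=
  let pairs := (recipes.map (fun q => (pvNorm ignore_numbers q.2, q.1))).filterMap
      (fun q => match q.1 with | some f => some (f, q.2) | none => none)
  let keys := PySem.List.dedup (pairs.map (fun p => p.1))   -- dict.fromkeys: ordered dedup
  keys.map (fun k => (k, (pairs.filter (fun p => p.1 == k)).map (fun p => p.2)))

-- ===== PRECONDITION & SPEC =====
-- Pre_ excludes exactly the inputs where A raises KeyError: some recipe dict lacks the "filename" key.
def Pre_compare_filenames (recipes : List (String × List (String × String))) (ignore_numbers : Bool) : Prop :=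
  ∀ p ∈ recipes, "filename" ∈ p.2.map Prod.fst

instance (recipes : List (String × List (String × String))) (ignore_numbers : Bool) : Decidable (Pre_compare_filenames recipes ignore_numbers) := by unfold Pre_compare_filenames; infer_instance

def pvWitness_compare_filenames : (List (String × List (String × String))) × Bool :=
  ([("app/A 1.recipe", [("filename", "Foo Bar.recipe")]), ("app/B.recipe", [("filename", "foobar.recipe")])], false)

def Spec_compare_filenames (recipes : List (String × List (String × String))) (ignore_numbers : Bool) (out : List (String × List String)) : Prop := out = compare_filenames_alt recipes ignore_numbers
instance (recipes : List (String × List (String × String))) (ignore_numbers : Bool) (out : List (String × List String)) : Decidable (Spec_compare_filenames recipes ignore_numbers out) := by unfold Spec_compare_filenames; infer_instance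

-- ===== CLAIM (what is proved, stated in full; the proofs are below) =====
def Claim_equal_compare_filenames : Prop := ∀ (recipes : List (String × List (String × String))) (ignore_numbers : Bool), Dom_compare_filenames recipes ignore_numbers → Pre_compare_filenames recipes ignore_numbers → Spec_compare_filenames recipes ignore_numbers (compare_filenames recipes ignore_numbers)

-- ===== LEMMAS AND PROOFS =====

-- A's loop body, named (compare_filenames is definitionally foldl of this)
def pvStepA (ign : Bool) (results : PySem.Dict String (List String)) (p : String × List (String × String)) : PySem.Dict String (List String) :=
  let filename := PySem.Str.replace (PySem.Str.lower ((PySem.Dict.ofList p.2).getD "filename" "")) " " ""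
  if PySem.Str.startswith filename "sharedprocessors" then results
  else
    let filename := if ign then String.mk (filename.toList.filter (fun x => !PySem.Chars.isdigit x)) else filename
    append_result results filename p.1

-- the filtered (normalized filename, relpath) pair list both programs are about
def pvPairs (ign : Bool) (recipes : List (String × List (String × String))) : List (String × String) :=
  recipes.filterMap (fun q => match pvNorm ign q.2 with | some f => some (f, q.1) | none => none)

-- both branches of append_result are one dict "modify"
theorem append_result_eq_modify (d : PySem.Dict String (List String)) (f r : String) :
    append_result d f r = d.modify f [] (fun l => l ++ [r]) := by
  unfold append_result
  by_cases h : d.contains f = false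
  · rw [if_pos h]
    unfold PySem.Dict.modify
    rw [PySem.Dict.getD_of_not_contains d [] h]
    rfl
  · rw [if_neg h]

-- A's loop body in terms of B's pvNorm
theorem stepA_eq (ign : Bool) (d : PySem.Dict String (List String)) (p : String × List (String × String)) :
    pvStepA ign d p = (match pvNorm ign p.2 with
      | none => d
      | some f => d.modify f [] (fun l => l ++ [p.1])) := by
  unfold pvStepA pvNorm
  cases hc : PySem.Str.startswith (PySem.Str.replace (PySem.Str.lower ((PySem.Dict.ofList p.2).getD "filename" "")) " " "") "sharedprocessors" with
  | true => simp only [hc, if_true]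
  | false => simp only [hc, Bool.false_eq_true, if_false, append_result_eq_modify]

-- A's loop over recipes is the modify-loop over the pair list
theorem foldlA_eq (ign : Bool) (recipes : List (String × List (String × String)))
    (d : PySem.Dict String (List String)) :
    recipes.foldl (pvStepA ign) d
    = (pvPairs ign recipes).foldl (fun d p => d.modify p.1 [] (fun l => l ++ [p.2])) d := by
  induction recipes generalizing d with
  | nil => rfl
  | cons p rest ih =>
      rw [List.foldl_cons, stepA_eq]
      unfold pvPairs
      cases h : pvNorm ign p.2 with
      | none => simp only [List.filterMap_cons, h]; exact ih d
      | some f => simp only [List.filterMap_cons, h, List.foldl_cons]; exact ih _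

-- items of a Nodup-keyed dict are recovered from keys and getD
theorem items_eq_keys_map (d : PySem.Dict String (List String)) (h : d.keys.Nodup) :
    d.keys.map (fun k => (k, d.getD k [])) = d.items := by
  have h1 : d.keys.map (fun k => (k, d.getD k [])) = d.items.map (fun p => (p.1, d.getD p.1 [])) := by
    simp [PySem.Dict.keys, List.map_map, Function.comp]
  rw [h1]
  conv_rhs => rw [← List.map_id d.items]
  apply List.map_congr_left
  intro p hp
  have hv : d.getD p.1 [] = p.2 :=
    PySem.Dict.getD_of_mem_items d (by exact hp) h []
  simp [hv]

set_option maxHeartbeats 1000000 in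
theorem compare_filenames_eq_alt (recipes : List (String × List (String × String))) (ign : Bool) :
    compare_filenames recipes ign = compare_filenames_alt recipes ign := by
  have hA : compare_filenames recipes ign = (recipes.foldl (pvStepA ign) PySem.Dict.empty).items := rfl
  rw [hA, foldlA_eq]
  have hpairs : (recipes.map (fun q => (pvNorm ign q.2, q.1))).filterMap
      (fun q => match q.1 with | some f => some (f, q.2) | none => none) = pvPairs ign recipes := by
    rw [List.filterMap_map]
    unfold pvPairs
    have h : ((fun q : Option String × String => match q.1 with | some f => some (f, q.2) | none => none) ∘ (fun q : String × List (String × String) => (pvNorm ign q.2, q.1))) = (fun q : String × List (String × String) => match pvNorm ign q.2 with | some f => some (f, q.1) | none => none) := by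
      funext q
      simp only [Function.comp]
    rw [h]
  unfold compare_filenames_alt
  rw [hpairs]
  set L := pvPairs ign recipes with hL
  have hkeys : (L.foldl (fun d p => d.modify p.1 [] (fun l => l ++ [p.2])) PySem.Dict.empty).keys
      = PySem.List.dedup (L.map (fun p => p.1)) := by
    rw [PySem.Dict.keys_foldl_modify_key L Prod.fst [] (fun _ x v => v ++ [x.2]) PySem.Dict.empty]
    rfl
  have hnodup : (L.foldl (fun d p => d.modify p.1 [] (fun l => l ++ [p.2])) PySem.Dict.empty).keys.Nodup :=
    PySem.Dict.nodup_keys_foldl_modify_key L Prod.fst [] (fun _ x v => v ++ [x.2]) PySem.Dict.empty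
      PySem.Dict.nodup_keys_empty
  rw [← items_eq_keys_map _ hnodup, hkeys]
  apply List.map_congr_left
  intro k _
  rw [PySem.Dict.getD_foldl_modify_append L PySem.Dict.empty k]
  simp [PySem.Dict.getD_empty]

-- ===== VERDICT (by name: the statement is the Claim_ definition above) =====
theorem compare_filenames_spec : Claim_equal_compare_filenames := by
  intro recipes ign _ _
  unfold Spec_compare_filenames
  exact compare_filenames_eq_alt recipes ign
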